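-- pv_equiv track=rewrite | github.com/kimhyeongjun95/AlgoPullgo | 4주차/문자열 게임 2/yeongha.py | string_game
-- ===== SOURCE A (Python) =====
-- from collections import defaultdict
--
-- def string_game(W, K):
--     if K == 1:  # K가 1일때는 문자열의 길이가 무조건 1
--         return [1, 1]
--     alphabet = defaultdict(int)
--
--     for i in W:
--         alphabet[i] += 1  # 각 알파벳들의 수를 딕셔너리에 저장
--     min_interval = len(W)-1
--     max_interval = 0
--     for key, value in alphabet.items():
--         if value >= K:  # 여러 알파벳 중 K개 이상인 알파벳만 확인
--             index_list = list(filter(lambda x: W[x] == key, range(len(W))))  # 해당 알파벳의 인덱스 구하기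
--
--             for j in range(len(index_list)-K+1):
--                 start, end = index_list[j], index_list[j+K-1]
--                 if end - start < min_interval:
--                     min_interval = end - start
--                 if end - start > max_interval:
--                     max_interval = end - start
--
--     if max_interval == 0:  # 문자열 못 찾음
--         return [-1]
--     return [min_interval+1, max_interval+1]
-- ===== SOURCE B (Python) =====
-- from collections import deque
--
-- def string_game(W, K):
--     if K == 1:
--         return [1, 1]
--     last = {}          # per letter: queue of its most recent < K occurrence indices
--     best_min = None
--     best_max = None
--     for i, c in enumerate(W):
--         q = last.setdefault(c, deque())
--         q.append(i)
--         if len(q) == K: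
--             span = i - q.popleft()
--             if best_min is None or span < best_min:
--                 best_min = span
--             if best_max is None or span > best_max:
--                 best_max = span
--     if best_max is None:
--         return [-1]
--     return [best_min + 1, best_max + 1]
-- ===== Notes on version B (the rewrite author's own statement) =====
-- stated objective: alternative
-- what changed: B makes a single streaming pass over W, keeping per letter a deque of its most recent occurrence indices and updating min/max the moment a K-th occurrence arrives, instead of A's staged passes (count all letters, then re-filter the whole string and run a window loop for each qualifying letter).
-- outside the precondition, e.g. on string_game('a', 0): A raises IndexError, B returns [-1]
import Mathlib
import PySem

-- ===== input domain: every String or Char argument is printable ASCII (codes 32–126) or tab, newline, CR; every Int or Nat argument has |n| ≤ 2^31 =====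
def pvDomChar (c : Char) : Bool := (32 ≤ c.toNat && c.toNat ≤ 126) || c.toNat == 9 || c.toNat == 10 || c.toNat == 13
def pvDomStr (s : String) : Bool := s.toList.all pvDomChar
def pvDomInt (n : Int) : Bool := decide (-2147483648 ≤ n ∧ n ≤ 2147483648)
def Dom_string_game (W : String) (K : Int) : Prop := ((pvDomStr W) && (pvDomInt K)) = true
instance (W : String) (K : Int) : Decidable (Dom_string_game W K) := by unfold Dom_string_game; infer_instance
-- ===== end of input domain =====

-- B replaces A's staged passes (count every letter, then one filter pass over W plus a
-- window loop per qualifying letter) by ONE streaming pass over W that keeps, per letter,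
-- a queue of its most recent occurrence indices and updates min/max on the fly;
-- objective: alternative (single online pass instead of staged per-letter passes).

-- ===== PORT A =====
-- loop bodies of A, as named helpers (same code, step for step)
def sgIndexList (W : String) (c : Char) : List Int :=
  (PySem.List.pyRange 0 (PySem.Str.len W)).filter (fun x => PySem.List.pyGet? W.toList x == some c)

def sgInnerA (index_list : List Int) (K : Int) (mm : Int × Int) (j : Int) : Int × Int :=
  let start := (PySem.List.pyGet? index_list j).getD 0
  let e := (PySem.List.pyGet? index_list (j + K - 1)).getD 0
  let mm1 := if e - start < mm.1 then (e - start, mm.2) else mm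
  if e - start > mm1.2 then (mm1.1, e - start) else mm1

def sgOuterA (W : String) (K : Int) (mm : Int × Int) (kv : Char × Int) : Int × Int :=
  if K ≤ kv.2 then
    let index_list := sgIndexList W kv.1
    (PySem.List.pyRange 0 (PySem.List.len index_list - K + 1)).foldl (sgInnerA index_list K) mm
  else mm

def string_game (W : String) (K : Int) : List Int :=
  if K == 1 then [1, 1]
  else
    let alphabet : PySem.Dict Char Int :=
      W.toList.foldl (fun d i => d.modify i 0 (· + 1)) PySem.Dict.empty
    let mm := alphabet.items.foldl (sgOuterA W K) (PySem.Str.len W - 1, 0)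
    if mm.2 == 0 then [-1] else [mm.1 + 1, mm.2 + 1]

-- ===== PORT B =====
-- B's min/max update (the two 'if best is None or …' statements)
def sgUpd (bb : Option Int × Option Int) (s : Int) : Option Int × Option Int :=
  (match bb.1 with | none => some s | some m => if s < m then some s else some m,
   match bb.2 with | none => some s | some M => if s > M then some s else some M)

-- one iteration of B's single loop: q = last.setdefault(c, deque()); q.append(i);
-- if len(q) == K: span = i - q.popleft().  (the deque is modelled as a Lean list;
-- setdefault + in-place append/popleft is modelled by re-inserting the updated list,
-- exact since the dict is only read back via getD; q is never empty, so headD/tail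
-- are exactly popleft.)
def sgQStep (K : Int) (st : PySem.Dict Char (List Int) × (Option Int × Option Int))
    (p : Int × Char) : PySem.Dict Char (List Int) × (Option Int × Option Int) :=
  let q := st.1.getD p.2 [] ++ [p.1]
  if PySem.List.len q == K then
    (st.1.insert p.2 q.tail, sgUpd st.2 (p.1 - q.headD 0))
  else
    (st.1.insert p.2 q, st.2)

def string_game_alt (W : String) (K : Int) : List Int :=
  if K == 1 then [1, 1]
  else
    let st := (PySem.List.enumerate W.toList).foldl (sgQStep K) (PySem.Dict.empty, (none, none))
    match st.2 with
    | (_, none) => [-1]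
    | (m, some M) => [m.getD 0 + 1, M + 1]

-- ===== PRECONDITION & SPEC =====
-- Pre_ excludes exactly the inputs where A raises: K ≤ 0 with W nonempty makes A read
-- index_list[len(index_list)] (and negative wrapped indices), an IndexError.
def Pre_string_game (W : String) (K : Int) : Prop := 1 ≤ K ∨ W = ""
instance (W : String) (K : Int) : Decidable (Pre_string_game W K) := by unfold Pre_string_game; infer_instance
def pvWitness_string_game : String × Int := ("aababcb", 2)

def Spec_string_game (W : String) (K : Int) (out : List Int) : Prop := out = string_game_alt W K
instance (W : String) (K : Int) (out : List Int) : Decidable (Spec_string_game W K out) := by unfold Spec_string_game; infer_instance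

-- ===== CLAIM (what is proved, stated in full; the proofs are below) =====
def Claim_equal_string_game : Prop := ∀ (W : String) (K : Int), Dom_string_game W K → Pre_string_game W K → Spec_string_game W K (string_game W K)

-- ===== LEMMAS AND PROOFS =====

-- the index bucket of letter c in cs, as Python ints
def sgPos (cs : List Char) (c : Char) : List Int :=
  ((List.range cs.length).filter (fun i => cs[i]? == some c)).map (fun i : Nat => (i : Int))

-- the window spans of K over a bucket
def sgSpans (K : Int) (L : List Int) : List Int :=
  (PySem.List.pyRange 0 (PySem.List.len L - K + 1)).map
    (fun j => (PySem.List.pyGet? L (j + K - 1)).getD 0 - (PySem.List.pyGet? L j).getD 0)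

def sgStepA (mm : Int × Int) (s : Int) : Int × Int :=
  let mm1 := if s < mm.1 then (s, mm.2) else mm
  if s > mm1.2 then (mm1.1, s) else mm1

-- B's queue for letter c after reading cs: the last min(count, K-1) positions of c
def sgQ (K : Int) (cs : List Char) (c : Char) : List Int :=
  (sgPos cs c).drop ((sgPos cs c).length + 1 - K.toNat)

-- B's accumulator after reading cs, written as a per-letter nested fold
def sgBigB (K : Int) (cs : List Char) : Option Int × Option Int :=
  (PySem.Set.ofList cs).foldl (fun bb c => (sgSpans K (sgPos cs c)).foldl sgUpd bb) (none, none)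

lemma sgUpd_comm (b : Option Int × Option Int) (x y : Int) :
    sgUpd (sgUpd b x) y = sgUpd (sgUpd b y) x := by
  obtain ⟨b1, b2⟩ := b
  rcases b1 with _ | m <;> rcases b2 with _ | M <;>
    dsimp only [sgUpd] <;> (try split_ifs) <;> (try dsimp only) <;>
    (try split_ifs) <;> (try dsimp only) <;> (try split_ifs) <;>
    simp_all <;> omega

lemma foldl_sgUpd_swap (L : List Int) (b : Option Int × Option Int) (s : Int) :
    L.foldl sgUpd (sgUpd b s) = sgUpd (L.foldl sgUpd b) s := by
  induction L generalizing b with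
  | nil => rfl
  | cons a t ih => rw [List.foldl_cons, List.foldl_cons, sgUpd_comm, ih]

lemma nest_sgUpd_swap (l : List Char) (g : Char → List Int) (b : Option Int × Option Int)
    (s : Int) :
    l.foldl (fun bb c => (g c).foldl sgUpd bb) (sgUpd b s)
      = sgUpd (l.foldl (fun bb c => (g c).foldl sgUpd bb) b) s := by
  induction l generalizing b with
  | nil => rfl
  | cons a t ih => rw [List.foldl_cons, List.foldl_cons, foldl_sgUpd_swap, ih]

-- inserting one extra span at one key of the nested fold = one sgUpd at the end
lemma sg_fold_mid (l : List Char) (g : Char → List Int) (x : Char) (s : Int)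
    (hx : x ∈ l) (hnd : l.Nodup) (init : Option Int × Option Int) :
    l.foldl (fun bb c => (if c = x then g c ++ [s] else g c).foldl sgUpd bb) init
      = sgUpd (l.foldl (fun bb c => (g c).foldl sgUpd bb) init) s := by
  induction l generalizing init with
  | nil => cases hx
  | cons a t ih =>
    rcases List.nodup_cons.mp hnd with ⟨ha, hndt⟩
    rw [List.foldl_cons, List.foldl_cons]
    by_cases hax : a = x
    · rw [if_pos hax, List.foldl_append, List.foldl_cons, List.foldl_nil]
      have ht : ∀ b, List.foldl (fun bb c => (if c = x then g c ++ [s] else g c).foldl sgUpd bb) b t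
          = List.foldl (fun bb c => (g c).foldl sgUpd bb) b t := by
        intro b
        refine List.foldl_ext _ _ b (fun bb c hc => ?_)
        rw [if_neg (fun h => ha (by rwa [h, ← hax] at hc))]
      rw [ht, nest_sgUpd_swap]
    · rw [if_neg hax]
      exact ih ((List.mem_cons.mp hx).resolve_left (fun h => hax h.symm)) hndt _

lemma sgPos_nil (c : Char) : sgPos [] c = [] := rfl

lemma sgPos_append (cs : List Char) (x c : Char) :
    sgPos (cs ++ [x]) c = sgPos cs c ++ (if c = x then [(cs.length : Int)] else []) := by
  unfold sgPos
  rw [List.length_append, List.length_singleton, List.range_succ, List.filter_append,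
    List.map_append]
  congr 1
  · congr 1
    refine List.filter_congr (fun i hi => ?_)
    rw [List.mem_range] at hi
    rw [List.getElem?_append_left hi]
  · rw [List.filter_singleton]
    have : (cs ++ [x])[cs.length]? = some x := by
      rw [List.getElem?_append_right (Nat.le_refl _)]
      simp
    rw [this]
    by_cases hxc : c = x
    · subst hxc; simp
    · have hne : ((some x == some c)) = false := by
        simpa using fun h : x = c => hxc h.symm
      rw [hne]
      simp [hxc]

lemma sgLen (cs : List Char) (c : Char) : (sgPos cs c).length = cs.count c := by
  induction cs using List.reverseRecOn with
  | nil => rfl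
  | append_singleton cs x ih =>
    rw [sgPos_append, List.length_append, ih, List.count_append, List.count_singleton]
    by_cases h : c = x
    · subst h; simp
    · have hx : (x == c) = false := by simpa using fun hh : x = c => h hh.symm
      simp [h, hx]

lemma sgPos_pairwise (cs : List Char) (c : Char) : (sgPos cs c).Pairwise (· < ·) := by
  refine List.Pairwise.map _ (fun a b h => ?_) ((List.pairwise_lt_range).filter _)
  exact_mod_cast h

lemma sgPos_mem (cs : List Char) (c : Char) {x : Int} (hx : x ∈ sgPos cs c) :
    0 ≤ x ∧ x ≤ (cs.length : Int) - 1 := by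
  simp only [sgPos, List.mem_map, List.mem_filter, List.mem_range] at hx
  obtain ⟨i, ⟨hi, _⟩, rfl⟩ := hx
  omega

lemma sgSpans_bounds (cs : List Char) (c : Char) {K : Int} (hK : 2 ≤ K) :
    ∀ s ∈ sgSpans K (sgPos cs c), 1 ≤ s ∧ s ≤ (cs.length : Int) - 1 := by
  intro s hs
  set L := sgPos cs c with hL
  simp only [sgSpans, List.mem_map, PySem.List.mem_pyRange_one, PySem.List.len_eq] at hs
  obtain ⟨j, ⟨hj0, hj1⟩, rfl⟩ := hs
  have hja : j.toNat < L.length := by omega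
  have hjb : (j + K - 1).toNat < L.length := by omega
  have hab : j.toNat < (j + K - 1).toNat := by omega
  rw [PySem.List.pyGet?_of_nonneg (h := hj0), PySem.List.pyGet?_of_nonneg (h := by omega)]
  rw [List.getElem?_eq_getElem hja, List.getElem?_eq_getElem hjb]
  simp only [Option.getD_some]
  have hlt : L[j.toNat] < L[(j + K - 1).toNat] :=
    (List.pairwise_iff_getElem.mp (sgPos_pairwise cs c)) _ _ hja hjb hab
  have h1 := sgPos_mem cs c (L.getElem_mem hja)
  have h2 := sgPos_mem cs c (L.getElem_mem hjb)
  omega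

lemma sgSpans_nil {K : Int} {L : List Int} (h : PySem.List.len L - K + 1 ≤ 0) :
    sgSpans K L = [] := by
  have h' : ((L.length : Int) - K + 1) ≤ 0 := by simpa [PySem.List.len_eq] using h
  simp [sgSpans, PySem.List.pyRange_one_eq_nil h']

-- appending one position to a bucket adds at most one window span at the end
lemma sgSpans_append {K : Int} (hK : 2 ≤ K) (L : List Int) (n : Int) :
    sgSpans K (L ++ [n])
      = sgSpans K L ++
        (if K ≤ (L.length : Int) + 1
          then [n - (L.drop (L.length + 1 - K.toNat)).headD 0] else []) := by
  by_cases hc : K ≤ (L.length : Int) + 1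
  · rw [if_pos hc]
    unfold sgSpans
    rw [PySem.List.len_eq, PySem.List.len_eq, List.length_append, List.length_singleton,
      Nat.cast_add, Nat.cast_one]
    have hsplit : ((L.length : Int) + 1 - K + 1) = ((L.length : Int) - K + 1) + 1 := by ring
    rw [hsplit, PySem.List.pyRange_one_succ_right (by omega), List.map_append]
    congr 1
    · refine List.map_congr_left (fun j hj => ?_)
      rw [PySem.List.mem_pyRange_one] at hj
      have h1 : PySem.List.pyGet? (L ++ [n]) j = PySem.List.pyGet? L j := by
        rw [PySem.List.pyGet?_of_nonneg (h := hj.1), PySem.List.pyGet?_of_nonneg (h := hj.1),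
          List.getElem?_append_left (by omega)]
      have h2 : PySem.List.pyGet? (L ++ [n]) (j + K - 1) = PySem.List.pyGet? L (j + K - 1) := by
        rw [PySem.List.pyGet?_of_nonneg (h := by omega),
          PySem.List.pyGet?_of_nonneg (h := by omega),
          List.getElem?_append_left (by omega)]
      rw [h1, h2]
    · rw [List.map_singleton]
      have hA : PySem.List.pyGet? (L ++ [n]) ((L.length : Int) - K + 1 + K - 1) = some n := by
        have : (L.length : Int) - K + 1 + K - 1 = (L.length : Int) := by ring
        rw [this, PySem.List.pyGet?_append_length]
      have hB : PySem.List.pyGet? (L ++ [n]) ((L.length : Int) - K + 1)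
          = L[L.length + 1 - K.toNat]? := by
        rw [PySem.List.pyGet?_of_nonneg (h := by omega),
          List.getElem?_append_left (by omega)]
        congr 1
        omega
      rw [hA, hB]
      simp only [Option.getD_some, List.headD_eq_head?_getD, List.head?_drop]
  · rw [if_neg hc, List.append_nil]
    have h1 : sgSpans K (L ++ [n]) = [] := by
      apply sgSpans_nil
      rw [PySem.List.len_eq, List.length_append, List.length_singleton]
      push_cast
      omega
    have h2 : sgSpans K L = [] := by
      apply sgSpans_nil
      rw [PySem.List.len_eq]
      omega
    rw [h1, h2]

-- appending one character to the string updates the nested fold by at most one sgUpd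
lemma sgBigB_append {K : Int} (hK : 2 ≤ K) (cs : List Char) (x : Char) :
    sgBigB K (cs ++ [x])
      = if K ≤ ((sgPos cs x).length : Int) + 1
          then sgUpd (sgBigB K cs) ((cs.length : Int) - (sgQ K cs x).headD 0)
          else sgBigB K cs := by
  unfold sgBigB
  rw [PySem.Set.ofList_append_singleton]
  by_cases hx : x ∈ cs
  · rw [PySem.Set.add_of_mem ((PySem.Set.mem_ofList _ _).mpr hx)]
    have hstep : ∀ (init : Option Int × Option Int),
        (PySem.Set.ofList cs).foldl (fun bb c => (sgSpans K (sgPos (cs ++ [x]) c)).foldl sgUpd bb) init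
          = (PySem.Set.ofList cs).foldl (fun bb c =>
              (if c = x then sgSpans K (sgPos cs c) ++
                  (if K ≤ ((sgPos cs x).length : Int) + 1
                    then [(cs.length : Int) - (sgQ K cs x).headD 0] else [])
                else sgSpans K (sgPos cs c)).foldl sgUpd bb) init := by
      intro init
      refine List.foldl_ext _ _ _ (fun bb c hc => ?_)
      by_cases hcx : c = x
      · subst hcx
        rw [if_pos rfl, sgPos_append, if_pos rfl, sgSpans_append hK]
        unfold sgQ
        rfl
      · rw [if_neg hcx, sgPos_append, if_neg hcx, List.append_nil]
    by_cases hcnt : K ≤ ((sgPos cs x).length : Int) + 1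
    · rw [if_pos hcnt, hstep]
      simp only [if_pos hcnt]
      exact sg_fold_mid (PySem.Set.ofList cs) (fun c => sgSpans K (sgPos cs c)) x
        ((cs.length : Int) - (sgQ K cs x).headD 0)
        ((PySem.Set.mem_ofList _ _).mpr hx) (PySem.Set.nodup_ofList cs) (none, none)
    · rw [if_neg hcnt, hstep]
      refine List.foldl_ext _ _ _ (fun bb c _ => ?_)
      by_cases hcx : c = x
      · subst hcx; rw [if_pos rfl, if_neg hcnt, List.append_nil]
      · rw [if_neg hcx]
  · have hx' : x ∉ PySem.Set.ofList cs := fun h => hx ((PySem.Set.mem_ofList _ _).mp h)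
    rw [PySem.Set.add_of_not_mem hx', List.foldl_append, List.foldl_cons, List.foldl_nil]
    have hm : (sgPos cs x).length = 0 := by
      rw [sgLen, List.count_eq_zero]
      exact hx
    have hcnt : ¬ K ≤ ((sgPos cs x).length : Int) + 1 := by rw [hm]; push_cast; omega
    rw [if_neg hcnt]
    have hlast : sgSpans K (sgPos (cs ++ [x]) x) = [] := by
      apply sgSpans_nil
      rw [PySem.List.len_eq, sgPos_append, if_pos rfl, List.length_append, List.length_singleton, hm]
      push_cast
      omega
    rw [hlast, List.foldl_nil]
    refine List.foldl_ext _ _ _ (fun bb c hc => ?_)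
    have hcx : c ≠ x := fun h => hx' (h ▸ hc)
    rw [sgPos_append, if_neg hcx, List.append_nil]

-- how one appended character changes a queue
lemma sgQ_other {K : Int} (cs : List Char) (x c : Char) (hcx : c ≠ x) :
    sgQ K (cs ++ [x]) c = sgQ K cs c := by
  unfold sgQ
  rw [sgPos_append, if_neg hcx, List.append_nil]

lemma sgQ_grow {K : Int} (hK : 2 ≤ K) (cs : List Char) (x : Char)
    (hcnt : ¬ K ≤ ((sgPos cs x).length : Int) + 1) :
    sgQ K (cs ++ [x]) x = sgQ K cs x ++ [(cs.length : Int)] := by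
  have hkt : ((K.toNat : Int)) = K := by omega
  unfold sgQ
  rw [sgPos_append, if_pos rfl, List.length_append, List.length_singleton]
  have h1 : (sgPos cs x).length + 1 + 1 - K.toNat = 0 := by omega
  have h2 : (sgPos cs x).length + 1 - K.toNat = 0 := by omega
  rw [h1, h2, List.drop_zero, List.drop_zero]

lemma sgQ_pop {K : Int} (hK : 2 ≤ K) (cs : List Char) (x : Char)
    (hcnt : K ≤ ((sgPos cs x).length : Int) + 1) :
    sgQ K (cs ++ [x]) x = (sgQ K cs x ++ [(cs.length : Int)]).tail := by
  have hkt : ((K.toNat : Int)) = K := by omega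
  unfold sgQ
  rw [sgPos_append, if_pos rfl, List.length_append, List.length_singleton]
  have hdrop : (sgPos cs x).length + 1 + 1 - K.toNat ≤ (sgPos cs x).length := by omega
  rw [List.drop_append_of_le_length hdrop]
  have hqne : (sgPos cs x).drop ((sgPos cs x).length + 1 - K.toNat) ≠ [] := by
    intro h
    have hl := congrArg List.length h
    rw [List.length_drop] at hl
    simp only [List.length_nil] at hl
    omega
  rw [List.tail_append_of_ne_nil hqne, List.tail_drop]
  congr 2
  omega

lemma sgQ_ne_nil {K : Int} (hK : 2 ≤ K) (cs : List Char) (x : Char)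
    (hcnt : K ≤ ((sgPos cs x).length : Int) + 1) : sgQ K cs x ≠ [] := by
  intro h
  have hl := congrArg List.length h
  unfold sgQ at hl
  rw [List.length_drop] at hl
  simp only [List.length_nil] at hl
  omega

-- the streaming pass computes exactly the per-letter queues and the nested fold
lemma sgStream {K : Int} (hK : 2 ≤ K) (cs : List Char) :
    (∀ c, ((PySem.List.enumerate cs).foldl (sgQStep K) (PySem.Dict.empty, (none, none))).1.getD c []
        = sgQ K cs c)
    ∧ ((PySem.List.enumerate cs).foldl (sgQStep K) (PySem.Dict.empty, (none, none))).2
        = sgBigB K cs := by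
  induction cs using List.reverseRecOn with
  | nil =>
    constructor
    · intro c
      simp [PySem.Dict.getD_empty, sgQ, sgPos_nil, PySem.List.enumerate_nil]
    · simp [PySem.List.enumerate_nil, sgBigB, PySem.Set.ofList_nil]
  | append_singleton cs x ih =>
    obtain ⟨ihq, ihb⟩ := ih
    rw [PySem.List.enumerate_append, PySem.List.enumerate_cons, PySem.List.enumerate_nil,
      List.foldl_append, List.foldl_cons, List.foldl_nil]
    set st := (PySem.List.enumerate cs).foldl (sgQStep K) (PySem.Dict.empty, (none, none)) with hst
    have hq0 : st.1.getD x [] = sgQ K cs x := ihq x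
    have hqlen : (sgQ K cs x).length
        = (sgPos cs x).length - ((sgPos cs x).length + 1 - K.toNat) := by
      unfold sgQ; rw [List.length_drop]
    unfold sgQStep
    simp only [hq0, zero_add]
    have hkt : ((K.toNat : Int)) = K := by omega
    by_cases hcnt : K ≤ ((sgPos cs x).length : Int) + 1
    · -- the window is completed: one span is emitted and the queue pops
      have hql : (sgQ K cs x).length = K.toNat - 1 := by omega
      have hlen : (PySem.List.len (sgQ K cs x ++ [(cs.length : Int)]) == K) = true := by
        rw [PySem.List.len_eq, List.length_append, List.length_singleton, hql]
        simp only [beq_iff_eq]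
        omega
      rw [if_pos hlen]
      obtain ⟨h0, q0t, hq0eq⟩ : ∃ h0 q0t, sgQ K cs x = h0 :: q0t :=
        ⟨_, _, (List.cons_head_tail (sgQ_ne_nil hK cs x hcnt)).symm⟩
      constructor
      · intro c
        dsimp only
        by_cases hcx : c = x
        · rw [hcx, PySem.Dict.getD_insert_self, sgQ_pop hK cs x hcnt]
        · rw [PySem.Dict.getD_insert_of_ne _ _ _ hcx, ihq c, sgQ_other cs x c hcx]
      · dsimp only
        rw [ihb, sgBigB_append hK, if_pos hcnt]
        congr 1
        rw [hq0eq, List.cons_append, List.headD_cons, List.headD_cons]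
    · -- fewer than K occurrences so far: the queue just grows
      have hql : (sgQ K cs x).length = (sgPos cs x).length := by omega
      rw [if_neg (by simp [PySem.List.len_eq, hql]; omega)]
      constructor
      · intro c
        dsimp only
        by_cases hcx : c = x
        · rw [hcx, PySem.Dict.getD_insert_self, sgQ_grow hK cs x hcnt]
        · rw [PySem.Dict.getD_insert_of_ne _ _ _ hcx, ihq c, sgQ_other cs x c hcx]
      · dsimp only
        rw [ihb, sgBigB_append hK, if_neg hcnt]

-- B's result, as the per-letter nested fold
lemma sgB (W : String) (K : Int) (hK : 2 ≤ K) (hKb : (K == 1) = false) :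
    string_game_alt W K =
      (match sgBigB K W.toList with
       | (_, none) => ([-1] : List Int)
       | (m, some M) => [m.getD 0 + 1, M + 1]) := by
  simp only [string_game_alt, hKb, Bool.false_eq_true, if_false]
  rw [(sgStream hK W.toList).2]

-- A-side: the filter pass over the whole string is the bucket
lemma sgPosA (cs : List Char) (c : Char) :
    (PySem.List.pyRange 0 (cs.length : Int)).filter (fun x => PySem.List.pyGet? cs x == some c)
      = sgPos cs c := by
  rw [PySem.List.pyRange_zero_natCast, List.filter_map]
  simp [sgPos, Function.comp_def]

lemma sgIndexList_eq (W : String) (c : Char) : sgIndexList W c = sgPos W.toList c := by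
  rw [sgIndexList, PySem.Str.len_eq, sgPosA]

lemma sgInnerA_fold (L : List Int) (K : Int) (mm : Int × Int) :
    (PySem.List.pyRange 0 (PySem.List.len L - K + 1)).foldl (sgInnerA L K) mm
      = (sgSpans K L).foldl sgStepA mm := by
  rw [sgSpans, List.foldl_map]; rfl

lemma sgOuterA_eq (W : String) (K : Int) (mm : Int × Int) (c : Char) :
    sgOuterA W K mm (c, (List.count c W.toList : Int))
      = (sgSpans K (sgPos W.toList c)).foldl sgStepA mm := by
  rw [sgOuterA]
  by_cases h : K ≤ (List.count c W.toList : Int)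
  · rw [if_pos h]
    simp only [sgIndexList_eq, sgInnerA_fold]
  · rw [if_neg h]
    have hlen : PySem.List.len (sgPos W.toList c) - K + 1 ≤ 0 := by
      have := sgLen W.toList c
      simp only [PySem.List.len_eq, this]
      omega
    rw [sgSpans_nil hlen, List.foldl_nil]

-- A's result, folded over the key set
lemma sgA (W : String) (K : Int) (hK : (K == 1) = false) :
    string_game W K =
      (let mm := (PySem.Set.ofList W.toList).foldl
          (fun mm c => (sgSpans K (sgPos W.toList c)).foldl sgStepA mm)
          ((W.toList.length : Int) - 1, 0);
       if mm.2 == 0 then [-1] else [mm.1 + 1, mm.2 + 1]) := by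
  simp only [string_game, hK, Bool.false_eq_true, if_false, ← PySem.Dict.counter_eq_foldl,
    PySem.Dict.items_counter, List.foldl_map, sgOuterA_eq, PySem.Str.len_eq]

-- the invariant tying A's (min,max) accumulator to B's optional one
def sgRel (n : Int) (mm : Int × Int) (bb : Option Int × Option Int) : Prop :=
  (bb = (none, none) ∧ mm = (n - 1, 0)) ∨
  (∃ a b, bb = (some a, some b) ∧ mm = (a, b) ∧ 1 ≤ b ∧ a ≤ n - 1)

lemma sgRel_step {n : Int} {mm bb s} (hs : 1 ≤ s ∧ s ≤ n - 1) (h : sgRel n mm bb) :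
    sgRel n (sgStepA mm s) (sgUpd bb s) := by
  obtain ⟨hs1, hs2⟩ := hs
  rcases h with ⟨hb, hm⟩ | ⟨a, b, hb, hm, hb1, ha⟩ <;> subst hb hm <;>
    simp only [sgStepA, sgUpd, sgRel] <;> right
  · refine ⟨s, s, by simp, ?_, hs1, hs2⟩
    split_ifs with h1 h2 h2 <;> simp_all <;> omega
  · refine ⟨min s a, max b s, ?_, ?_, by omega, by omega⟩ <;>
      split_ifs with h1 h2 h2 <;> simp_all <;> omega

lemma sgRel_fold {n : Int} (S : List Int) (hS : ∀ s ∈ S, 1 ≤ s ∧ s ≤ n - 1)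
    {mm bb} (h : sgRel n mm bb) : sgRel n (S.foldl sgStepA mm) (S.foldl sgUpd bb) := by
  induction S generalizing mm bb with
  | nil => exact h
  | cons x t ih =>
    exact ih (fun s hs => hS s (List.mem_cons_of_mem _ hs))
      (sgRel_step (hS x (List.mem_cons_self)) h)

-- per-key outer fold preserves the invariant (K ≥ 2)
lemma sgRel_outer (cs : List Char) {K : Int} (hK2 : 2 ≤ K) (l : List Char)
    {mm bb} (h : sgRel (cs.length : Int) mm bb) :
    sgRel (cs.length : Int)
      (l.foldl (fun mm c => (sgSpans K (sgPos cs c)).foldl sgStepA mm) mm)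
      (l.foldl (fun bb c => (sgSpans K (sgPos cs c)).foldl sgUpd bb) bb) := by
  induction l generalizing mm bb with
  | nil => exact h
  | cons c t ih => exact ih (sgRel_fold _ (sgSpans_bounds cs c hK2) h)

-- ===== VERDICT (by name: the statement is the Claim_ definition above) =====
theorem string_game_spec : Claim_equal_string_game := by
  intro W K _ hPre
  unfold Spec_string_game
  by_cases hK1 : K = 1
  · subst hK1; rfl
  have hKb : (K == 1) = false := by simp [hK1]
  rcases hPre with hK | hW
  · have hK2 : 2 ≤ K := by omega
    rw [sgA W K hKb, sgB W K hK2 hKb]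
    have hrel := sgRel_outer W.toList hK2 (PySem.Set.ofList W.toList)
      (Or.inl ⟨rfl, rfl⟩ : sgRel (W.toList.length : Int) ((W.toList.length : Int) - 1, 0) (none, none))
    unfold sgBigB
    rcases hrel with ⟨hb, hm⟩ | ⟨a, b, hb, hm, hb1, ha⟩ <;> rw [hb, hm]
    · rfl
    · have : (b == 0) = false := by simp; omega
      simp [this]
  · subst hW
    have hnilA : ("" : String).toList = [] := rfl
    simp only [string_game, string_game_alt, hKb, Bool.false_eq_true, if_false, hnilA,
      List.foldl_nil, PySem.List.enumerate_nil]
    rfl
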